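-- pv_equiv track=rewrite | github.com/K4liber/web_games | back/bluff/check.py | _small_straight
-- ===== SOURCE A (Python) =====
-- def _small_straight(
--     sequence: str,
--     cards: list[tuple[str, str]]
-- ) -> bool:
--     _needed_figure_to_count = {
--         '9': 0,
--         '10': 0,
--         'jack': 0,
--         'queen': 0,
--         'king': 0
--     }
--
--     for card in cards:
--         figure = card[0]
--
--         if figure in _needed_figure_to_count:
--             _needed_figure_to_count[figure] += 1
--
--     if all(list(_needed_figure_to_count.values())):
--         return True
--
--     return False
-- ===== SOURCE B (Python) =====
-- def _small_straight(
--     sequence: str,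
--     cards: list[tuple[str, str]]
-- ) -> bool:
--     return all(
--         any(card[0] == figure for card in cards)
--         for figure in ('9', '10', 'jack', 'queen', 'king')
--     )
-- ===== Notes on version B (the rewrite author's own statement) =====
-- stated objective: simpler
-- what changed: B inverts the traversal: it loops over the five needed figures and scans the cards for each with any(), maintaining no dict/set/counter at all, instead of A's single pass that filters figures into a counting dict and then checks all counts nonzero.
import Mathlib
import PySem

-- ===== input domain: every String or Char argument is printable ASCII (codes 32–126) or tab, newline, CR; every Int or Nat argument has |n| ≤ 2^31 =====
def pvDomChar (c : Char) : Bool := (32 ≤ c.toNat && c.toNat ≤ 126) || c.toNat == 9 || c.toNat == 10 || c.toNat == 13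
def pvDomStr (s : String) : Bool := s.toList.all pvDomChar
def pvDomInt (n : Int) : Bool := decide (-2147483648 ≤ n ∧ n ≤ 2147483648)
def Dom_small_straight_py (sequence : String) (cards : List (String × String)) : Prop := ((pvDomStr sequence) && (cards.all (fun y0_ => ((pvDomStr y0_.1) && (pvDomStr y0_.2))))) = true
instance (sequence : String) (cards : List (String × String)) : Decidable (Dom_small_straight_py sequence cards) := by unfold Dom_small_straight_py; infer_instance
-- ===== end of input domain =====

-- B inverts the traversal: an outer loop over the five needed figures with an inner any-scan of the cards, keeping no counting dict (simpler; same cost).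

-- ===== PORT A =====
def small_straight_py (sequence : String) (cards : List (String × String)) : Bool :=
  let d0 : PySem.Dict String Int :=
    PySem.Dict.ofList [("9", 0), ("10", 0), ("jack", 0), ("queen", 0), ("king", 0)]
  let d := cards.foldl (fun d card =>
    let figure := card.1
    if d.contains figure then d.modify figure 0 (· + 1) else d) d0
  if d.values.all (fun v => v != 0) then true else false

-- ===== PORT B =====
def small_straight_py_alt (sequence : String) (cards : List (String × String)) : Bool :=
  ["9", "10", "jack", "queen", "king"].all
    (fun figure => cards.any (fun card => card.1 == figure))

-- ===== PRECONDITION & SPEC =====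
def Spec_small_straight_py (sequence : String) (cards : List (String × String)) (out : Bool) : Prop := out = small_straight_py_alt sequence cards
instance (sequence : String) (cards : List (String × String)) (out : Bool) : Decidable (Spec_small_straight_py sequence cards out) := by unfold Spec_small_straight_py; infer_instance

-- ===== CLAIM (what is proved, stated in full; the proofs are below) =====
def Claim_equal_small_straight_py : Prop := ∀ (sequence : String) (cards : List (String × String)), Dom_small_straight_py sequence cards → Spec_small_straight_py sequence cards (small_straight_py sequence cards)

-- ===== LEMMAS AND PROOFS =====

-- A's loop body and its initial dict, named for the lemmas below.
def pvStep (d : PySem.Dict String Int) (card : String × String) : PySem.Dict String Int :=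
  if d.contains card.1 then d.modify card.1 0 (· + 1) else d

def pvD0 : PySem.Dict String Int :=
  PySem.Dict.ofList [("9", 0), ("10", 0), ("jack", 0), ("queen", 0), ("king", 0)]

def pvKeys : List String := ["9", "10", "jack", "queen", "king"]

lemma pvStep_keys (d : PySem.Dict String Int) (c : String × String) : (pvStep d c).keys = d.keys := by
  unfold pvStep
  split
  · rw [PySem.Dict.keys_modify, PySem.Dict.keys_insert_of_contains]
    assumption
  · rfl

lemma pvFold_keys (cards : List (String × String)) (d : PySem.Dict String Int) :
    (cards.foldl pvStep d).keys = d.keys := by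
  induction cards generalizing d with
  | nil => rfl
  | cons c rest ih => rw [List.foldl_cons, ih, pvStep_keys]

lemma pvStep_contains (d : PySem.Dict String Int) (c : String × String) (f : String)
    (hf : d.contains f = true) : (pvStep d c).contains f = true := by
  unfold pvStep
  split
  · rw [PySem.Dict.contains_modify]; simp [hf]
  · exact hf

-- counting invariant of A's loop at any key the dict contains
lemma pvFold_getD (cards : List (String × String)) (d : PySem.Dict String Int) (f : String)
    (hf : d.contains f = true) :
    (cards.foldl pvStep d).getD f 0 = d.getD f 0 + ((cards.map Prod.fst).count f : Int) := by
  induction cards generalizing d with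
  | nil => simp
  | cons c rest ih =>
    rw [List.foldl_cons, ih (pvStep d c) (pvStep_contains d c f hf)]
    have hst : (pvStep d c).getD f 0 = if c.1 = f then d.getD f 0 + 1 else d.getD f 0 := by
      unfold pvStep
      split
      · rw [PySem.Dict.getD_modify]
        by_cases hfc : f = c.1 <;> simp [hfc, eq_comm]
      · have hne : ¬ c.1 = f := by
          intro he; rename_i hnc; rw [he] at hnc; simp [hf] at hnc
        simp [hne]
    rw [hst]
    by_cases hfc : c.1 = f <;> simp [List.count_cons, hfc] <;> push_cast <;> ring

lemma pvContains_of_mem (f : String) (hfm : f ∈ pvKeys) : pvD0.contains f = true := by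
  fin_cases hfm <;> decide

lemma pvGetD0 (f : String) (hfm : f ∈ pvKeys) : pvD0.getD f 0 = 0 := by
  fin_cases hfm <;> decide

theorem small_straight_py_spec : Claim_equal_small_straight_py := by
  intro sequence cards _
  unfold Spec_small_straight_py small_straight_py small_straight_py_alt
  show (if ((cards.foldl pvStep pvD0).values.all (fun v => v != 0)) = true then true else false)
      = pvKeys.all (fun figure => cards.any (fun card => card.1 == figure))
  have hkeys : (cards.foldl pvStep pvD0).keys = pvKeys := by
    rw [pvFold_keys]; decide
  have hnodup : (cards.foldl pvStep pvD0).keys.Nodup := by rw [hkeys]; decide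
  have hone : ∀ f ∈ pvKeys,
      ((((cards.foldl pvStep pvD0).getD f 0) != 0) = true ↔
        cards.any (fun card => card.1 == f) = true) := by
    intro f hfm
    rw [pvFold_getD cards pvD0 f (pvContains_of_mem f hfm), pvGetD0 f hfm]
    rw [List.any_eq_true]
    constructor
    · intro h
      have : 0 < (cards.map Prod.fst).count f := by
        simp only [zero_add, bne_iff_ne, ne_eq, Int.natCast_eq_zero] at h
        omega
      obtain ⟨x, hx, rfl⟩ := List.mem_map.mp (List.count_pos_iff.mp this)
      exact ⟨x, hx, by simp⟩
    · rintro ⟨c, hc, hcf⟩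
      have : f ∈ cards.map Prod.fst := List.mem_map.mpr ⟨c, hc, by simpa using hcf⟩
      have := List.count_pos_iff.mpr this
      simp only [zero_add, bne_iff_ne, ne_eq, Int.natCast_eq_zero]
      omega
  rw [PySem.Dict.values_eq_map_keys _ hnodup 0, hkeys]
  by_cases hA : (pvKeys.map (fun k => (cards.foldl pvStep pvD0).getD k 0)).all (fun v => v != 0) = true
  · rw [if_pos hA]
    symm
    rw [List.all_eq_true]
    intro f hfm
    exact (hone f hfm).mp (List.all_eq_true.mp hA _ (List.mem_map_of_mem hfm))
  · rw [if_neg hA]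
    symm
    rw [Bool.eq_false_iff]
    intro hB
    apply hA
    rw [List.all_eq_true]
    rintro v hv
    obtain ⟨f, hfm, rfl⟩ := List.mem_map.mp hv
    exact (hone f hfm).mpr (List.all_eq_true.mp hB f hfm)
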